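-- pv_equiv track=rewrite | github.com/blkdev02/UTAx-CSE1309x | uta week 7.py | d1
-- ===== SOURCE A (Python) =====
-- def d1(lst):
--     temp_lst = []
--     for i in lst:
--         sort1 = sorted(i)
--         for k in sort1:
--             temp_lst.append(k)
--     temp_lst.sort()
--     return temp_lst
--
-- def sort1(lst):
--     lst1 = []
--     for i in lst:
--         i.sort(reverse = True)
--         lst1.append(i)
--     return lst
-- ===== SOURCE B (Python) =====
-- def _merge(a, b):
--     out = []
--     i = j = 0
--     while i < len(a) and j < len(b):
--         if a[i] <= b[j]:
--             out.append(a[i]); i += 1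
--         else:
--             out.append(b[j]); j += 1
--     out.extend(a[i:])
--     out.extend(b[j:])
--     return out
--
-- def d1(lst):
--     runs = [sorted(i) for i in lst]
--     if not runs:
--         return []
--     while len(runs) > 1:
--         runs = [_merge(runs[k], runs[k + 1]) if k + 1 < len(runs) else runs[k]
--                 for k in range(0, len(runs), 2)]
--     return runs[0]
-- ===== Notes on version B (the rewrite author's own statement) =====
-- stated objective: alternative
-- what changed: B sorts each sublist and does a bottom-up k-way merge (repeatedly merging adjacent pairs of sorted runs with a two-pointer merge) instead of appending everything into one list and re-sorting it globally.
import Mathlib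
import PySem

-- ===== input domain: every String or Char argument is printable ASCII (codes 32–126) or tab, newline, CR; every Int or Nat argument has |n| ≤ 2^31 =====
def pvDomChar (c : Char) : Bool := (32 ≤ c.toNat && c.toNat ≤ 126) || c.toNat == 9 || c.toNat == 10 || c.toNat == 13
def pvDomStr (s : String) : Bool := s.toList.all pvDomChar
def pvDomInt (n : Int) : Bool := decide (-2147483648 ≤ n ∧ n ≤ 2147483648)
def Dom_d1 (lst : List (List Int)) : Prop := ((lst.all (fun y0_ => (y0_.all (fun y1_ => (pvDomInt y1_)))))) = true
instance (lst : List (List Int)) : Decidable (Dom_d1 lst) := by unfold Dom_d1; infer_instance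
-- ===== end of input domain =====

-- B replaces A's concatenate-then-global-sort with sorting each sublist and bottom-up pairwise merging of the sorted runs (alternative algorithm; return value proved identical).
-- ===== PORT A =====
-- for i in lst: sort1 = sorted(i); for k in sort1: temp_lst.append(k)  then temp_lst.sort()
def d1 (lst : List (List Int)) : List Int :=
  let temp_lst : List Int :=
    lst.foldl (fun acc i =>
      (PySem.List.sorted i (fun x => x) false).foldl (fun a k => a ++ [k]) acc) []
  PySem.List.sorted temp_lst (fun x => x) false

-- ===== PORT B =====
-- B: two-pointer linear merge (_merge in Source B), folded over the sorted sublists; no final global sort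
def pvMerge : List Int → List Int → List Int
  | [], b => b
  | a, [] => a
  | x :: xs, y :: ys =>
      if x ≤ y then x :: pvMerge xs (y :: ys) else y :: pvMerge (x :: xs) ys

-- one round of the while loop: merge adjacent pairs of runs
def pvMergePairs : List (List Int) → List (List Int)
  | a :: b :: rest => pvMerge a b :: pvMergePairs rest
  | xs => xs

theorem pvMergePairs_length_lt (a b : List Int) (rest : List (List Int)) :
    (pvMergePairs (a :: b :: rest)).length < (a :: b :: rest).length := by
  induction rest using pvMergePairs.induct with
  | case1 c d rest' ih => simp only [pvMergePairs, List.length_cons] at ih ⊢; omega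
  | case2 xs h => cases xs with
    | nil => simp [pvMergePairs]
    | cons c t => cases t with
      | nil => simp [pvMergePairs]
      | cons d t' => exact absurd rfl (h c d t')

-- while len(runs) > 1: runs = mergePairs(runs)
def pvMergeAll : List (List Int) → List Int
  | [] => []
  | [r] => r
  | a :: b :: rest => pvMergeAll (pvMergePairs (a :: b :: rest))
termination_by runs => runs.length
decreasing_by exact pvMergePairs_length_lt a b rest

def d1_alt (lst : List (List Int)) : List Int :=
  pvMergeAll (lst.map (fun i => PySem.List.sorted i (fun x => x) false))

-- ===== PRECONDITION & SPEC =====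
def Spec_d1 (lst : List (List Int)) (out : List Int) : Prop := out = d1_alt lst
instance (lst : List (List Int)) (out : List Int) : Decidable (Spec_d1 lst out) := by unfold Spec_d1; infer_instance

-- ===== CLAIM (what is proved, stated in full; the proofs are below) =====
def Claim_equal_d1 : Prop := ∀ (lst : List (List Int)), Dom_d1 lst → Spec_d1 lst (d1 lst)

-- ===== LEMMAS AND PROOFS =====

theorem pvMerge_perm (a b : List Int) : (pvMerge a b).Perm (a ++ b) := by
  induction a generalizing b with
  | nil => simp [pvMerge]
  | cons x xs ih =>
    induction b with
    | nil => simp [pvMerge]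
    | cons y ys ihb =>
      simp only [pvMerge]
      split
      · exact (ih (y :: ys)).cons x
      · refine (ihb.cons y).trans ?_
        simpa using (List.perm_middle (a := y) (l₁ := x :: xs) (l₂ := ys)).symm

theorem pvMerge_sorted (a b : List Int) (ha : a.Pairwise (· ≤ ·)) (hb : b.Pairwise (· ≤ ·)) :
    (pvMerge a b).Pairwise (· ≤ ·) := by
  induction a generalizing b with
  | nil => simpa [pvMerge] using hb
  | cons x xs ih =>
    induction b with
    | nil => simpa [pvMerge] using ha
    | cons y ys ihb =>
      rcases List.pairwise_cons.mp ha with ⟨hxall, hxs⟩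
      rcases List.pairwise_cons.mp hb with ⟨hyall, hys⟩
      simp only [pvMerge]
      split
      next hxy =>
        refine List.pairwise_cons.mpr ⟨?_, ih (y :: ys) hxs hb⟩
        intro z hz
        have hz' := (pvMerge_perm xs (y :: ys)).mem_iff.mp hz
        rcases List.mem_append.mp hz' with h | h
        · exact hxall z h
        · rcases List.mem_cons.mp h with h | h
          · exact h ▸ hxy
          · exact le_trans hxy (hyall z h)
      next hxy =>
        refine List.pairwise_cons.mpr ⟨?_, ihb hys⟩
        intro z hz
        have hz' := (pvMerge_perm (x :: xs) ys).mem_iff.mp hz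
        rcases List.mem_append.mp hz' with h | h
        · rcases List.mem_cons.mp h with h | h
          · exact h ▸ le_of_not_ge hxy
          · exact le_trans (le_of_not_ge hxy) (hxall z h)
        · exact hyall z h

theorem pvMergePairs_flatten_perm (xs : List (List Int)) :
    (pvMergePairs xs).flatten.Perm xs.flatten := by
  induction xs using pvMergePairs.induct with
  | case1 a b rest ih =>
    simp only [pvMergePairs, List.flatten_cons]
    refine ((pvMerge_perm a b).append_right _).trans ?_
    refine (ih.append_left (a ++ b)).trans ?_
    simp
  | case2 xs h =>
    cases xs with
    | nil => simp [pvMergePairs]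
    | cons c t => cases t with
      | nil => simp [pvMergePairs]
      | cons d t' => exact absurd rfl (h c d t')

theorem pvMergePairs_all_sorted (xs : List (List Int))
    (h : ∀ r ∈ xs, r.Pairwise (· ≤ ·)) :
    ∀ r ∈ pvMergePairs xs, r.Pairwise (· ≤ ·) := by
  induction xs using pvMergePairs.induct with
  | case1 a b rest ih =>
    intro r hr
    simp only [pvMergePairs, List.mem_cons] at hr
    rcases hr with hr | hr
    · exact hr ▸ pvMerge_sorted a b (h a (by simp)) (h b (by simp))
    · exact ih (fun r hr' => h r (by simp [hr'])) r hr
  | case2 xs hne =>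
    cases xs with
    | nil => simp [pvMergePairs]
    | cons c t => cases t with
      | nil => simpa [pvMergePairs] using h
      | cons d t' => exact absurd rfl (hne c d t')

theorem pvMergeAll_perm (xs : List (List Int)) : (pvMergeAll xs).Perm xs.flatten := by
  induction xs using pvMergeAll.induct with
  | case1 => simp [pvMergeAll]
  | case2 r => simp [pvMergeAll]
  | case3 a b rest ih =>
    rw [pvMergeAll]
    exact ih.trans (pvMergePairs_flatten_perm _)

theorem pvMergeAll_sorted (xs : List (List Int))
    (h : ∀ r ∈ xs, r.Pairwise (· ≤ ·)) : (pvMergeAll xs).Pairwise (· ≤ ·) := by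
  induction xs using pvMergeAll.induct with
  | case1 => simp [pvMergeAll]
  | case2 r => simpa [pvMergeAll] using h r (by simp)
  | case3 a b rest ih =>
    rw [pvMergeAll]
    exact ih (pvMergePairs_all_sorted _ h)

-- ===== VERDICT (by name: the statement is the Claim_ definition above) =====
theorem d1_spec : Claim_equal_d1 := by
  intro lst _
  unfold Spec_d1 d1 d1_alt
  simp only [PySem.List.foldl_append_singleton, PySem.List.foldl_append_eq_flatMap,
    List.nil_append]
  have h1 := pvMergeAll_sorted (lst.map (fun i => PySem.List.sorted i (fun x => x) false))
    (by intro r hr; rcases List.mem_map.mp hr with ⟨i, _, rfl⟩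
        exact PySem.List.sorted_pairwise i (fun x => x))
  have h2 := pvMergeAll_perm (lst.map (fun i => PySem.List.sorted i (fun x => x) false))
  rw [List.flatMap_def] at *
  exact PySem.List.sorted_id_eq_of_perm_of_pairwise _ _ h2 h1
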